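-- pv_equiv track=rewrite | github.com/satyanarayan-rao/protein_binding_at_enhancers | scripts/call_footprints.py | call_footprints
-- ===== SOURCE A (Python) =====
-- def call_footprints(methylation_vec):
--     # Example:
--     # -------------------------
--
--     # % : unmethylated  C
--     # $ : methylated C
--     # . : non-C
--     # ^ : footprint
--
--     # Original read:  $ . $ . $ . . . $ . . . . % . . . . . $ . . . % . . . $ . . . .
--     #                 0 1 2 3 4 5 6 7 8 9 10111213141516171819202122232425262728293031
--     # Footprint read: . . . . . . . . . . ^ ^ ^ ^ ^ ^ ^ . . . . ^ ^ ^ ^ ^ . . . . . .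
--     #                 0 1 2 3 4 5 6 7 8 9 10111213141516171819202122232425262728293031
--     cnt = 0
--     footprint_vec = []
--     upper_case_loc = []
--     footprint_vec = []
--     to_return_vec = ""
--     footrprint_length_dict = {}
--     for i in range(len(methylation_vec)):
--         l = methylation_vec[i]
--         if (l == l.upper()) and (l != ".") :
--             upper_case_loc.append(i)
--
--
--     if len (upper_case_loc)>=2:
--         footprint_vec.extend("."*upper_case_loc[0]) # first append `.` untill the first capital letter
--         for i in range(len(upper_case_loc) - 1):
--             current_loc = upper_case_loc[i]
--             next_loc = upper_case_loc[i + 1]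
--             string_in_between = methylation_vec[current_loc + 1: next_loc] # find footrpint in this
--             unmethylated_loc = []
--             for j in range(len(string_in_between)):
--                 l = string_in_between[j]
--                 if (l == l.lower()) and (l != "."):
--                     unmethylated_loc.append(current_loc + j)
--                 else:
--                     continue
--             if len (unmethylated_loc) >=1:
--                 left_boundary = (unmethylated_loc[0] + current_loc)//2
--                 right_boundary = (unmethylated_loc[-1] + next_loc)//2
--                 footprint_vec.append("."*(left_boundary - current_loc))
--                 footprint_vec.append ("F"*(right_boundary - left_boundary + 1 ))
--                 footprint_vec.append("."*(next_loc - right_boundary - 1))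
--                 footrprint_length_dict["-".join([str(left_boundary), str(right_boundary)])] = right_boundary - left_boundary + 1
--             else:
--                 footprint_vec.append("."*(next_loc - current_loc))
--         # append the last one
--         footprint_vec.append("."*( len(methylation_vec) - upper_case_loc[-1]))
--         to_return_vec = "".join(footprint_vec)
--
--         return to_return_vec, footrprint_length_dict
--
--     else:
--        to_return_vec = "."*len(methylation_vec)
--        return to_return_vec, footrprint_length_dict
-- ===== SOURCE B (Python) =====
-- def call_footprints(methylation_vec):
--     # Single streaming pass with O(1) state: no anchor list, no substring
--     # slicing -- close a footprint interval the moment the next anchor is seen.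
--     n = len(methylation_vec)
--     out = []
--     lengths = {}
--     prev = None   # last anchor position seen so far
--     first = None  # first stored unmethylated offset (p-1) since prev
--     last = None   # last stored unmethylated offset (p-1) since prev
--     pos = 0       # length of output emitted so far
--     for p, ch in enumerate(methylation_vec):
--         if ch == ch.upper() and ch != ".":
--             if prev is not None and first is not None:
--                 lb = (first + prev) // 2
--                 rb = (last + p) // 2
--                 out.append("." * (lb - pos))
--                 out.append("F" * (rb - lb + 1))
--                 lengths["-".join([str(lb), str(rb)])] = rb - lb + 1
--                 pos = rb + 1
--             prev = p
--             first = None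
--             last = None
--         elif ch == ch.lower() and ch != "." and prev is not None:
--             if first is None:
--                 first = p - 1
--             last = p - 1
--     out.append("." * (n - pos))
--     return "".join(out), lengths
-- ===== Notes on version B (the rewrite author's own statement) =====
-- stated objective: alternative
-- what changed: B replaces A's two-phase algorithm (collect the full anchor-position list, then re-scan the substring between each consecutive anchor pair) by a single streaming pass with an O(1) state machine (last anchor, first/last stored unmethylated offset, emit position): each footprint interval is closed and emitted the moment the next anchor is reached, so no anchor list and no substring slicing exist at all.
import Mathlib
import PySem

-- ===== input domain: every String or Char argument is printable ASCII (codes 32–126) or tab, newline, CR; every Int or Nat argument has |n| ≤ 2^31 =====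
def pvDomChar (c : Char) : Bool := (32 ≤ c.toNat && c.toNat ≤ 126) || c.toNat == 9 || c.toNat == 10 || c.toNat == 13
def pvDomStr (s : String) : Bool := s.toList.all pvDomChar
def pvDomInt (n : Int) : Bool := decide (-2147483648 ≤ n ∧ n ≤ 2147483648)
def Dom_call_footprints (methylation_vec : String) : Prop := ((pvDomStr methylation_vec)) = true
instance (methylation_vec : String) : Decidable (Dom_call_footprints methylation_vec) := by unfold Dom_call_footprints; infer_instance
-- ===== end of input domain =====

-- B replaces A's two-phase scheme (collect all anchor positions, then re-scan the substring
-- between each consecutive pair) by ONE streaming pass with an O(1) state machine that closes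
-- each footprint interval as soon as the next anchor is reached; same values, similar cost.


-- ===== PORT A =====
-- A: first loop 'for i in range(len(methylation_vec)): … if l == l.upper() and l != ".": upper_case_loc.append(i)'
def pvA_upperLocs (cs : List Char) : List Int :=
  (PySem.List.pyRange 0 (cs.length : Int) 1).foldl
    (fun acc i =>
      let l := PySem.List.pyGetD cs i ' '
      if l = PySem.Chars.upperChar l ∧ l ≠ '.' then acc ++ [i] else acc) []

-- A: inner loop 'for j in range(len(string_in_between)): … unmethylated_loc.append(current_loc + j)'
def pvA_unmeth (sib : List Char) (current_loc : Int) : List Int :=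
  (PySem.List.pyRange 0 (sib.length : Int) 1).foldl
    (fun acc j =>
      let l := PySem.List.pyGetD sib j ' '
      if l = PySem.Chars.lowerChar l ∧ l ≠ '.' then acc ++ [current_loc + j] else acc) []

-- A: body of 'for i in range(len(upper_case_loc) - 1)' (same lets, same branch order)
def pvA_step (cs : List Char) (st : List (List Char) × PySem.Dict (List Char) Int)
    (current_loc next_loc : Int) : List (List Char) × PySem.Dict (List Char) Int :=
  let string_in_between := PySem.List.slice cs (some (current_loc + 1)) (some next_loc)
  let unmethylated_loc := pvA_unmeth string_in_between current_loc
  if unmethylated_loc.length ≥ 1 then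
    let left_boundary := PySem.Int.floordiv (PySem.List.pyGetD unmethylated_loc 0 0 + current_loc) 2
    let right_boundary := PySem.Int.floordiv (PySem.List.pyGetD unmethylated_loc (-1) 0 + next_loc) 2
    (st.1 ++ [PySem.List.pyRepeat ['.'] (left_boundary - current_loc),
              PySem.List.pyRepeat ['F'] (right_boundary - left_boundary + 1),
              PySem.List.pyRepeat ['.'] (next_loc - right_boundary - 1)],
     st.2.insert (PySem.Chars.join ['-'] [PySem.Int.toChars left_boundary, PySem.Int.toChars right_boundary])
                 (right_boundary - left_boundary + 1))
  else
    (st.1 ++ [PySem.List.pyRepeat ['.'] (next_loc - current_loc)], st.2)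

-- dict keys are built as char lists and wrapped to String in the returned association list
def call_footprints (methylation_vec : String) : String × (List (String × Int)) :=
  let cs := methylation_vec.toList
  let upper_case_loc := pvA_upperLocs cs
  if upper_case_loc.length ≥ 2 then
    -- footprint_vec.extend("."*upper_case_loc[0]) : one single-char string per '.'
    let fv0 : List (List Char) :=
      (PySem.List.pyRepeat ['.'] (PySem.List.pyGetD upper_case_loc 0 0)).map (fun c => [c])
    let st := (PySem.List.pyRange 0 ((upper_case_loc.length : Int) - 1) 1).foldl
      (fun st i => pvA_step cs st (PySem.List.pyGetD upper_case_loc i 0)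
                                  (PySem.List.pyGetD upper_case_loc (i + 1) 0))
      (fv0, PySem.Dict.empty)
    let fv := st.1 ++ [PySem.List.pyRepeat ['.'] ((cs.length : Int) - PySem.List.pyGetD upper_case_loc (-1) 0)]
    (String.ofList (PySem.Chars.join [] fv), st.2.items.map (fun p => (String.ofList p.1, p.2)))
  else
    (String.ofList (PySem.List.pyRepeat ['.'] (cs.length : Int)), (PySem.Dict.empty : PySem.Dict (List Char) Int).items.map (fun p => (String.ofList p.1, p.2)))

-- ===== PORT B =====
-- B's whole loop state: Source B's O(1) variables prev/first/last/pos plus the output chunks and dict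
structure BSt where
  prev : Option Int
  first : Option Int
  last : Option Int
  out : List (List Char)
  pos : Int
  d : PySem.Dict (List Char) Int

-- Source B's loop body for one (p, ch) of enumerate(methylation_vec)
def pvB_step (st : BSt) (pc : Int × Char) : BSt :=
  if pc.2 = PySem.Chars.upperChar pc.2 ∧ pc.2 ≠ '.' then
    match st.prev, st.first with
    | some prev, some first =>
        let lb := PySem.Int.floordiv (first + prev) 2
        -- Source B reads `last` unguarded here: it is always set when `first` is, so getD 0 never defaults
        let rb := PySem.Int.floordiv (st.last.getD 0 + pc.1) 2
        { prev := some pc.1, first := none, last := none,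
          out := st.out ++ [PySem.List.pyRepeat ['.'] (lb - st.pos),
                            PySem.List.pyRepeat ['F'] (rb - lb + 1)],
          pos := rb + 1,
          d := st.d.insert (PySem.Chars.join ['-'] [PySem.Int.toChars lb, PySem.Int.toChars rb])
                           (rb - lb + 1) }
    | _, _ => { st with prev := some pc.1, first := none, last := none }
  else if pc.2 = PySem.Chars.lowerChar pc.2 ∧ pc.2 ≠ '.' ∧ st.prev ≠ none then
    { st with first := some (st.first.getD (pc.1 - 1)), last := some (pc.1 - 1) }
  else st

def call_footprints_alt (methylation_vec : String) : String × (List (String × Int)) :=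
  let cs := methylation_vec.toList
  let st := (PySem.List.enumerate cs 0).foldl pvB_step ⟨none, none, none, [], 0, PySem.Dict.empty⟩
  (String.ofList (PySem.Chars.join [] (st.out ++ [PySem.List.pyRepeat ['.'] ((cs.length : Int) - st.pos)])),
   st.d.items.map (fun p => (String.ofList p.1, p.2)))

-- ===== PRECONDITION & SPEC =====
def Spec_call_footprints (methylation_vec : String) (out : String × (List (String × Int))) : Prop := out = call_footprints_alt methylation_vec
instance (methylation_vec : String) (out : String × (List (String × Int))) : Decidable (Spec_call_footprints methylation_vec out) := by unfold Spec_call_footprints; infer_instance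

-- ===== CLAIM (what is proved, stated in full; the proofs are below) =====
def Claim_equal_call_footprints : Prop := ∀ (methylation_vec : String), Dom_call_footprints methylation_vec → Spec_call_footprints methylation_vec (call_footprints methylation_vec)

-- ===== LEMMAS AND PROOFS =====

-- generic: a comprehension over 'if P x then some (f x) else none' vs filter-then-map
theorem pv_filterMap_ite_map {α β : Type} (P : α → Prop) [DecidablePred P] (f : α → β) (l : List α) :
    l.filterMap (fun x => if P x then some (f x) else none)
      = (l.filter (fun x => decide (P x))).map f := by
  induction l with
  | nil => rfl
  | cons a t ih => by_cases h : P a <;> simp [h, ih]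

-- A's anchor collection as a filter over the index range
theorem pv_anchorsA_eq (cs : List Char) :
    pvA_upperLocs cs
      = (PySem.List.pyRange 0 (cs.length : Int) 1).filter
          (fun i => decide (PySem.List.pyGetD cs i ' ' = PySem.Chars.upperChar (PySem.List.pyGetD cs i ' ') ∧ PySem.List.pyGetD cs i ' ' ≠ '.')) := by
  unfold pvA_upperLocs
  have h := PySem.List.foldl_append_if
      (fun i => decide (PySem.List.pyGetD cs i ' ' = PySem.Chars.upperChar (PySem.List.pyGetD cs i ' ') ∧ PySem.List.pyGetD cs i ' ' ≠ '.'))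
      (fun i => i) (PySem.List.pyRange 0 (cs.length : Int) 1) []
  simp only [decide_eq_true_eq] at h
  rw [h]
  simp

theorem pv_anchors_sorted (cs : List Char) : List.Pairwise (· < ·) (pvA_upperLocs cs) := by
  rw [pv_anchorsA_eq, PySem.List.pyRange_zero_natCast]
  exact ((List.pairwise_lt_range.map _ (by intro a b hab; exact_mod_cast hab)).filter _)

theorem pv_anchors_mem_iff (cs : List Char) (p : Int) :
    p ∈ pvA_upperLocs cs
      ↔ (0 ≤ p ∧ p < (cs.length : Int)
          ∧ (PySem.List.pyGetD cs p ' ' = PySem.Chars.upperChar (PySem.List.pyGetD cs p ' ') ∧ PySem.List.pyGetD cs p ' ' ≠ '.')) := by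
  rw [pv_anchorsA_eq, List.mem_filter, PySem.List.mem_pyRange_one]
  simp
  tauto

-- A's inner unmethylated scan as filter-then-map over the index range
theorem pv_unmethA_eq (sib : List Char) (c : Int) :
    pvA_unmeth sib c
      = ((PySem.List.pyRange 0 (sib.length : Int) 1).filter
          (fun j => decide (PySem.List.pyGetD sib j ' ' = PySem.Chars.lowerChar (PySem.List.pyGetD sib j ' ') ∧ PySem.List.pyGetD sib j ' ' ≠ '.'))).map (fun j => c + j) := by
  unfold pvA_unmeth
  have h := PySem.List.foldl_append_if
      (fun j => decide (PySem.List.pyGetD sib j ' ' = PySem.Chars.lowerChar (PySem.List.pyGetD sib j ' ') ∧ PySem.List.pyGetD sib j ' ' ≠ '.'))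
      (fun j => c + j) (PySem.List.pyRange 0 (sib.length : Int) 1) []
  simp only [decide_eq_true_eq] at h
  rw [h]
  simp

theorem pv_unmeth_sorted (sib : List Char) (c : Int) :
    List.Pairwise (· < ·) (pvA_unmeth sib c) := by
  rw [pv_unmethA_eq, PySem.List.pyRange_zero_natCast]
  have h1 : List.Pairwise (· < ·) (List.map (fun k : Nat => (k : Int)) (List.range sib.length)) :=
    List.pairwise_lt_range.map _ (by intro a b hab; exact_mod_cast hab)
  exact (h1.filter _).map _ (by intro a b hab; omega)

theorem pv_unmeth_mem (sib : List Char) (c : Int) :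
    ∀ u ∈ pvA_unmeth sib c, c ≤ u ∧ u < c + (sib.length : Int) := by
  intro u hu
  rw [pv_unmethA_eq] at hu
  obtain ⟨j, hj, rfl⟩ := List.mem_map.mp hu
  have := PySem.List.mem_pyRange_one.mp (List.mem_of_mem_filter hj)
  omega

-- head ≤ getLast for a strictly sorted nonempty list
theorem pv_head_le_getLast (l : List Int) (h : l ≠ []) (hs : List.Pairwise (· < ·) l) :
    PySem.List.pyGetD l 0 0 ≤ PySem.List.pyGetD l (-1) 0 := by
  rw [PySem.List.pyGetD_neg_one l 0 h, PySem.List.pyGetD_zero]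
  obtain ⟨a, t, rfl⟩ := List.exists_cons_of_ne_nil h
  have hmem := List.getLast_mem h
  rcases List.mem_cons.mp hmem with heq | hmem'
  · rw [List.getD_cons_zero]
    exact heq.ge
  · have := (List.pairwise_cons.mp hs).1 _ hmem'
    rw [List.getD_cons_zero]; omega

-- A's loop step, as a function of the (current, next) anchor pair
def pvStepA (cs : List Char) (st : List (List Char) × PySem.Dict (List Char) Int) (pr : Int × Int) :
    List (List Char) × PySem.Dict (List Char) Int :=
  pvA_step cs st pr.1 pr.2

-- A's step with the chunk list flattened into a char accumulator
def pvStepAc (cs : List Char) (st : List Char × PySem.Dict (List Char) Int) (pr : Int × Int) :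
    List Char × PySem.Dict (List Char) Int :=
  let unmeth := pvA_unmeth (PySem.List.slice cs (some (pr.1 + 1)) (some pr.2)) pr.1
  if unmeth.length ≥ 1 then
    let lb := PySem.Int.floordiv (PySem.List.pyGetD unmeth 0 0 + pr.1) 2
    let rb := PySem.Int.floordiv (PySem.List.pyGetD unmeth (-1) 0 + pr.2) 2
    (st.1 ++ PySem.List.pyRepeat ['.'] (lb - pr.1)
          ++ PySem.List.pyRepeat ['F'] (rb - lb + 1)
          ++ PySem.List.pyRepeat ['.'] (pr.2 - rb - 1),
     st.2.insert (PySem.Chars.join ['-'] [PySem.Int.toChars lb, PySem.Int.toChars rb]) (rb - lb + 1))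
  else (st.1 ++ PySem.List.pyRepeat ['.'] (pr.2 - pr.1), st.2)

theorem pv_join_nil_flatten (l : List (List Char)) : PySem.Chars.join [] l = l.flatten := by
  induction l with
  | nil => rfl
  | cons a t ih =>
    cases t with
    | nil => rfl
    | cons b r =>
      simp only [PySem.Chars.join, List.intercalate] at *
      rw [List.intersperse_cons₂]
      simp_all

-- flattening A's chunk-list fold gives the char-accumulator fold
theorem pv_foldA_flatten (cs : List Char) (ps : List (Int × Int)) :
    ∀ (fv : List (List Char)) (d : PySem.Dict (List Char) Int),
      ((ps.foldl (pvStepA cs) (fv, d)).1.flatten, (ps.foldl (pvStepA cs) (fv, d)).2)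
        = ps.foldl (pvStepAc cs) (fv.flatten, d) := by
  induction ps with
  | nil => intro fv d; rfl
  | cons p t ih =>
    intro fv d
    have hA : (pvStepA cs (fv, d) p).1.flatten = (pvStepAc cs (fv.flatten, d) p).1 ∧
        (pvStepA cs (fv, d) p).2 = (pvStepAc cs (fv.flatten, d) p).2 := by
      unfold pvStepA pvA_step pvStepAc
      by_cases h : (pvA_unmeth (PySem.List.slice cs (some (p.1 + 1)) (some p.2)) p.1).length ≥ 1 <;>
        simp [h]
    rw [List.foldl_cons, List.foldl_cons,
        show pvStepA cs (fv, d) p = ((pvStepA cs (fv, d) p).1, (pvStepA cs (fv, d) p).2) from rfl,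
        ih, hA.1, hA.2]

-- the pair list A iterates over (indexing) is the zip of adjacent anchors
theorem pv_zip_pairs (as : List Int) :
    (PySem.List.pyRange 0 ((as.length : Int) - 1) 1).map
      (fun i => (PySem.List.pyGetD as i 0, PySem.List.pyGetD as (i + 1) 0))
      = as.zip as.tail := by
  cases as with
  | nil => rfl
  | cons a t =>
    have hlen : ((a :: t).length : Int) - 1 = (t.length : Int) := by simp
    rw [hlen, PySem.List.pyRange_zero_natCast, List.map_map]
    apply List.ext_getElem
    · simp
    · intro i h1 h2
      simp only [Function.comp_def, List.getElem_map, List.getElem_range, List.getElem_zip]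
      have hi : i < t.length := by simpa using h2
      apply Prod.ext
      · rw [PySem.List.pyGetD_natCast]
        rw [List.getD_eq_getElem _ _ (by simp; omega)]
      · show PySem.List.pyGetD (a :: t) ((i : Int) + 1) 0 = t[i]
        rw [show ((i : Int) + 1) = ((i + 1 : Nat) : Int) by push_cast; ring,
            PySem.List.pyGetD_natCast,
            List.getD_eq_getElem _ _ (by simp; omega)]
        exact List.getElem_cons_succ _ _ _ _

-- A's indexed pair loop is the fold over zipped adjacent anchors
theorem pv_foldA_indexed (cs : List Char) (as : List Int)
    (init : List (List Char) × PySem.Dict (List Char) Int) :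
    (PySem.List.pyRange 0 ((as.length : Int) - 1) 1).foldl
      (fun st i => pvA_step cs st (PySem.List.pyGetD as i 0) (PySem.List.pyGetD as (i + 1) 0)) init
      = (as.zip as.tail).foldl (pvStepA cs) init := by
  rw [← pv_zip_pairs as, List.foldl_map]
  rfl

-- ===== B-side machinery: segments of the enumerate stream =====

-- the (index, char) stream between positions a and b
def pvSeg (cs : List Char) (a b : Int) : List (Int × Char) :=
  (PySem.List.pyRange a b 1).map (fun p => (p, PySem.List.pyGetD cs p ' '))

-- the unmethylated offsets (p-1) stored by B's streaming pass over a stream piece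
def pvStored (l : List (Int × Char)) : List Int :=
  l.filterMap
    (fun pc => if pc.2 = PySem.Chars.lowerChar pc.2 ∧ pc.2 ≠ '.' then some (pc.1 - 1) else none)

-- before the first anchor (prev = None) non-anchor chars leave the state untouched
theorem pv_noanch0 (l : List (Int × Char)) :
    ∀ (st : BSt), st.prev = none →
      (∀ pc ∈ l, ¬(pc.2 = PySem.Chars.upperChar pc.2 ∧ pc.2 ≠ '.')) →
      l.foldl pvB_step st = st := by
  induction l with
  | nil => intro st _ _; rfl
  | cons pc t ih =>
    intro st hprev hno
    have hstep : pvB_step st pc = st := by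
      simp only [pvB_step]
      rw [if_neg (hno pc (List.mem_cons_self ..)),
          if_neg (by intro h; exact h.2.2 hprev)]
    rw [List.foldl_cons, hstep]
    exact ih st hprev (fun pc h => hno pc (List.mem_cons_of_mem _ h))

-- after an anchor, a run of non-anchor chars only updates first/last with the stored offsets
theorem pv_noanch (l : List (Int × Char)) :
    ∀ (st : BSt), st.prev ≠ none →
      (∀ pc ∈ l, ¬(pc.2 = PySem.Chars.upperChar pc.2 ∧ pc.2 ≠ '.')) →
      l.foldl pvB_step st
        = { st with first := st.first.or (pvStored l).head?,
                    last := (pvStored l).getLast?.or st.last } := by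
  induction l with
  | nil =>
    intro st _ _
    cases st with
    | mk prev first last out pos d => cases first <;> cases last <;> rfl
  | cons pc t ih =>
    intro st hprev hno
    have hnA := hno pc (List.mem_cons_self ..)
    by_cases hl : pc.2 = PySem.Chars.lowerChar pc.2 ∧ pc.2 ≠ '.'
    · have hstep : pvB_step st pc
          = { st with first := some (st.first.getD (pc.1 - 1)), last := some (pc.1 - 1) } := by
        simp only [pvB_step]
        rw [if_neg hnA, if_pos ⟨hl.1, hl.2, hprev⟩]
      have hstored : pvStored (pc :: t) = (pc.1 - 1) :: pvStored t := by
        simp only [pvStored, List.filterMap_cons]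
        rw [if_pos hl]
      rw [List.foldl_cons, hstep,
          ih _ (by simpa using hprev) (fun pc h => hno pc (List.mem_cons_of_mem _ h)), hstored]
      have hfst : (some (st.first.getD (pc.1 - 1))).or (pvStored t).head?
          = st.first.or ((pc.1 - 1) :: pvStored t).head? := by
        cases st.first <;> simp
      have hlst : (pvStored t).getLast?.or (some (pc.1 - 1))
          = ((pc.1 - 1) :: pvStored t).getLast?.or st.last := by
        cases h : pvStored t with
        | nil => simp
        | cons x xs => rw [List.getLast?_cons_cons]; cases hx : (x :: xs).getLast? with
          | none => simp at hx
          | some y => simp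
      simp only [hfst, hlst]
    · have hstep : pvB_step st pc = st := by
        simp only [pvB_step]
        rw [if_neg hnA, if_neg (by intro h; exact hl ⟨h.1, h.2.1⟩)]
      have hstored : pvStored (pc :: t) = pvStored t := by
        simp only [pvStored, List.filterMap_cons]
        rw [if_neg hl]
      rw [List.foldl_cons, hstep,
          ih st hprev (fun pc h => hno pc (List.mem_cons_of_mem _ h)), hstored]

-- shifting a range
theorem pv_pyRange_shift : ∀ (k : Nat) (a c : Int),
    PySem.List.pyRange a (a + (k : Int)) 1
      = (PySem.List.pyRange c (c + (k : Int)) 1).map (fun j => (a - c) + j) := by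
  intro k
  induction k with
  | zero =>
    intro a c
    rw [PySem.List.pyRange_one_eq_nil (by omega), PySem.List.pyRange_one_eq_nil (by omega)]
    rfl
  | succ k ih =>
    intro a c
    have ea : a + ((k + 1 : Nat) : Int) = (a + 1) + (k : Int) := by push_cast; ring
    have ec : c + ((k + 1 : Nat) : Int) = (c + 1) + (k : Int) := by push_cast; ring
    rw [ea, ec, PySem.List.pyRange_one_cons (a := a) (b := a + 1 + (k : Int)) (by omega),
        PySem.List.pyRange_one_cons (a := c) (b := c + 1 + (k : Int)) (by omega),
        List.map_cons, ih (a + 1) (c + 1)]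
    have hf : (fun j : Int => (a + 1) - (c + 1) + j) = (fun j : Int => (a - c) + j) := by
      funext j; ring
    rw [hf]
    congr 1
    omega

-- B's stored offsets over one gap are exactly A's unmethylated_loc for that gap
theorem pv_stored_eq (cs : List Char) (cur nxt : Int)
    (h0 : 0 ≤ cur) (h1 : cur < nxt) (h2 : nxt ≤ (cs.length : Int)) :
    pvStored (pvSeg cs (cur + 1) nxt)
      = pvA_unmeth (PySem.List.slice cs (some (cur + 1)) (some nxt)) cur := by
  have hsl : PySem.List.slice cs (some (cur + 1)) (some nxt)
      = List.take (nxt.toNat - (cur + 1).toNat) (List.drop (cur + 1).toNat cs) :=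
    PySem.List.slice_of_nonneg cs (by omega) (by omega) (by omega) (by omega)
  have hlen : (PySem.List.slice cs (some (cur + 1)) (some nxt)).length
      = nxt.toNat - (cur + 1).toNat := by
    rw [hsl]; simp; omega
  set sib := PySem.List.slice cs (some (cur + 1)) (some nxt) with hsib
  set K : Nat := nxt.toNat - (cur + 1).toNat with hKdef
  have hselem : ∀ k : Nat, k < K → PySem.List.pyGetD sib (k : Int) ' '
      = PySem.List.pyGetD cs (cur + 1 + (k : Int)) ' ' := by
    intro k hk
    have hkl : k < sib.length := by omega
    have hcl : (cur + 1).toNat + k < cs.length := by omega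
    have hgs : sib[k]'hkl = cs[(cur + 1).toNat + k]'hcl := by
      simp only [hsl]
      rw [List.getElem_take, List.getElem_drop]
    rw [PySem.List.pyGetD_natCast,
        show cur + 1 + (k : Int) = (((cur + 1).toNat + k : Nat) : Int) by omega,
        PySem.List.pyGetD_natCast,
        List.getD_eq_getElem _ _ hkl, List.getD_eq_getElem _ _ hcl, hgs]
  rw [pv_unmethA_eq, hlen]
  unfold pvStored pvSeg
  rw [List.filterMap_map,
      show nxt = (cur + 1) + (K : Int) by omega,
      pv_pyRange_shift K (cur + 1) 0,
      show (0 : Int) + (K : Int) = ((K : Nat) : Int) by omega,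
      PySem.List.pyRange_zero_natCast, List.filterMap_map, List.filter_map, List.map_map]
  simp only [Function.comp_def, sub_zero]
  rw [← pv_filterMap_ite_map
        (fun k : Nat => PySem.List.pyGetD sib (k : Int) ' ' = PySem.Chars.lowerChar (PySem.List.pyGetD sib (k : Int) ' ') ∧ PySem.List.pyGetD sib (k : Int) ' ' ≠ '.')
        (fun k : Nat => cur + (k : Int)), List.filterMap_map]
  simp only [Function.comp_def]
  apply List.filterMap_congr
  intro k hk
  have hkK : k < K := List.mem_range.mp hk
  rw [hselem k hkK]
  by_cases hc : PySem.List.pyGetD cs (cur + 1 + (k : Int)) ' ' = PySem.Chars.lowerChar (PySem.List.pyGetD cs (cur + 1 + (k : Int)) ' ') ∧ PySem.List.pyGetD cs (cur + 1 + (k : Int)) ' ' ≠ '.'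
  · rw [if_pos hc, if_pos hc]
    congr 1
    omega
  · rw [if_neg hc, if_neg hc]

-- two replicate-bookkeeping helpers for the simulation proof
theorem pv_chunks0 (o : List Char) (A B C : Nat) (h : A + B = C) :
    o ++ List.replicate A '.' ++ List.replicate B '.' = o ++ List.replicate C '.' := by
  rw [← h, List.replicate_add, List.append_assoc]

theorem pv_chunks (o : List Char) (P Q K R D E : Nat) (h1 : P + Q = D) (h2 : R = E) :
    o ++ List.replicate P '.' ++ List.replicate Q '.' ++ List.replicate K 'F' ++ List.replicate R '.'
      = o ++ (List.replicate D '.' ++ List.replicate K 'F') ++ List.replicate E '.' := by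
  subst h2
  rw [← h1, List.replicate_add]
  simp [List.append_assoc]

-- ===== the streaming simulation invariant =====

-- B's state after streaming the rest of the input, starting just after anchor `cur`
def pvStF (cs : List Char) (cur pos : Int) (out : List (List Char)) (d : PySem.Dict (List Char) Int) : BSt :=
  (pvSeg cs (cur + 1) (cs.length : Int)).foldl pvB_step ⟨some cur, none, none, out, pos, d⟩

-- A's accumulator after folding its per-gap step over the adjacent anchor pairs
def pvAcF (cs : List Char) (as : List Int) (cur pos : Int) (out : List (List Char))
    (d : PySem.Dict (List Char) Int) : List Char × PySem.Dict (List Char) Int :=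
  ((cur :: as).zip as).foldl (pvStepAc cs)
    (out.flatten ++ List.replicate (cur.toNat - pos.toNat) '.', d)

-- the streaming step at an anchor when no unmethylated C was stored (first = None)
theorem pvB_step_anch1 (pv : Option Int) (p : Int) (c : Char)
    (out : List (List Char)) (pos : Int) (d : PySem.Dict (List Char) Int)
    (h : c = PySem.Chars.upperChar c ∧ c ≠ '.') :
    pvB_step ⟨pv, none, none, out, pos, d⟩ (p, c) = ⟨some p, none, none, out, pos, d⟩ := by
  unfold pvB_step
  rw [if_pos (show ((p, c) : Int × Char).2 = PySem.Chars.upperChar ((p, c) : Int × Char).2 ∧ ((p, c) : Int × Char).2 ≠ '.' from h)]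
  cases pv <;> rfl

-- the streaming step at an anchor that closes a footprint
theorem pvB_step_anch2 (cur u0 ul p : Int) (c : Char)
    (out : List (List Char)) (pos : Int) (d : PySem.Dict (List Char) Int)
    (h : c = PySem.Chars.upperChar c ∧ c ≠ '.') :
    pvB_step ⟨some cur, some u0, some ul, out, pos, d⟩ (p, c)
      = ⟨some p, none, none,
         out ++ [PySem.List.pyRepeat ['.'] (PySem.Int.floordiv (u0 + cur) 2 - pos),
                 PySem.List.pyRepeat ['F'] (PySem.Int.floordiv (ul + p) 2 - PySem.Int.floordiv (u0 + cur) 2 + 1)],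
         PySem.Int.floordiv (ul + p) 2 + 1,
         d.insert (PySem.Chars.join ['-'] [PySem.Int.toChars (PySem.Int.floordiv (u0 + cur) 2),
                                           PySem.Int.toChars (PySem.Int.floordiv (ul + p) 2)])
                  (PySem.Int.floordiv (ul + p) 2 - PySem.Int.floordiv (u0 + cur) 2 + 1)⟩ := by
  unfold pvB_step
  rw [if_pos (show ((p, c) : Int × Char).2 = PySem.Chars.upperChar ((p, c) : Int × Char).2 ∧ ((p, c) : Int × Char).2 ≠ '.' from h)]
  rfl

-- A's char-accumulator step when the gap has no unmethylated C
theorem pvStepAc_nil (cs : List Char) (st : List Char × PySem.Dict (List Char) Int) (cur nxt : Int)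
    (h : pvA_unmeth (PySem.List.slice cs (some (cur + 1)) (some nxt)) cur = []) :
    pvStepAc cs st (cur, nxt) = (st.1 ++ PySem.List.pyRepeat ['.'] (nxt - cur), st.2) := by
  simp only [pvStepAc]
  rw [h]
  simp

-- A's char-accumulator step on a real footprint
theorem pvStepAc_fp (cs : List Char) (st : List Char × PySem.Dict (List Char) Int) (cur nxt : Int)
    (hne : pvA_unmeth (PySem.List.slice cs (some (cur + 1)) (some nxt)) cur ≠ []) :
    pvStepAc cs st (cur, nxt)
      = (st.1 ++ PySem.List.pyRepeat ['.'] (PySem.Int.floordiv (PySem.List.pyGetD (pvA_unmeth (PySem.List.slice cs (some (cur + 1)) (some nxt)) cur) 0 0 + cur) 2 - cur)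
              ++ PySem.List.pyRepeat ['F'] (PySem.Int.floordiv (PySem.List.pyGetD (pvA_unmeth (PySem.List.slice cs (some (cur + 1)) (some nxt)) cur) (-1) 0 + nxt) 2 - PySem.Int.floordiv (PySem.List.pyGetD (pvA_unmeth (PySem.List.slice cs (some (cur + 1)) (some nxt)) cur) 0 0 + cur) 2 + 1)
              ++ PySem.List.pyRepeat ['.'] (nxt - PySem.Int.floordiv (PySem.List.pyGetD (pvA_unmeth (PySem.List.slice cs (some (cur + 1)) (some nxt)) cur) (-1) 0 + nxt) 2 - 1),
         st.2.insert (PySem.Chars.join ['-'] [PySem.Int.toChars (PySem.Int.floordiv (PySem.List.pyGetD (pvA_unmeth (PySem.List.slice cs (some (cur + 1)) (some nxt)) cur) 0 0 + cur) 2),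
                                              PySem.Int.toChars (PySem.Int.floordiv (PySem.List.pyGetD (pvA_unmeth (PySem.List.slice cs (some (cur + 1)) (some nxt)) cur) (-1) 0 + nxt) 2)])
                     (PySem.Int.floordiv (PySem.List.pyGetD (pvA_unmeth (PySem.List.slice cs (some (cur + 1)) (some nxt)) cur) (-1) 0 + nxt) 2 - PySem.Int.floordiv (PySem.List.pyGetD (pvA_unmeth (PySem.List.slice cs (some (cur + 1)) (some nxt)) cur) 0 0 + cur) 2 + 1)) := by
  simp only [pvStepAc]
  rw [if_pos (by have := List.length_pos_of_ne_nil hne; omega)]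

theorem pv_streamloop (cs : List Char) :
    ∀ (as : List Int) (cur pos : Int) (out : List (List Char)) (d : PySem.Dict (List Char) Int),
      0 ≤ pos → pos ≤ cur → 0 ≤ cur → cur < (cs.length : Int) →
      (∀ a ∈ as, cur < a ∧ a < (cs.length : Int)) → List.Pairwise (· < ·) as →
      (∀ p : Int, cur < p → p < (cs.length : Int) →
        ((PySem.List.pyGetD cs p ' ' = PySem.Chars.upperChar (PySem.List.pyGetD cs p ' ') ∧ PySem.List.pyGetD cs p ' ' ≠ '.') ↔ p ∈ as)) →
      ((pvStF cs cur pos out d).out.flatten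
          ++ List.replicate (cs.length - (pvStF cs cur pos out d).pos.toNat) '.'
         = (pvAcF cs as cur pos out d).1
             ++ List.replicate (cs.length - ((cur :: as).getLast (List.cons_ne_nil _ _)).toNat) '.')
      ∧ (pvStF cs cur pos out d).d = (pvAcF cs as cur pos out d).2
      ∧ 0 ≤ (pvStF cs cur pos out d).pos := by
  intro as
  induction as with
  | nil =>
    intro cur pos out d hp0 hpc h0 hL hmem hpw hch
    have hno : ∀ pc ∈ pvSeg cs (cur + 1) (cs.length : Int),
        ¬(pc.2 = PySem.Chars.upperChar pc.2 ∧ pc.2 ≠ '.') := by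
      intro pc hpc'
      obtain ⟨p, hp, rfl⟩ := List.mem_map.mp hpc'
      have hb := PySem.List.mem_pyRange_one.mp hp
      intro h
      exact List.not_mem_nil ((hch p (by omega) (by omega)).mp h)
    have hF : pvStF cs cur pos out d
        = ⟨some cur, (pvStored (pvSeg cs (cur + 1) (cs.length : Int))).head?,
           (pvStored (pvSeg cs (cur + 1) (cs.length : Int))).getLast?, out, pos, d⟩ := by
      unfold pvStF
      rw [pv_noanch _ _ (by simp) hno]
      simp [Option.or_none, Option.none_or]
    have hAc : pvAcF cs [] cur pos out d
        = (out.flatten ++ List.replicate (cur.toNat - pos.toNat) '.', d) := rfl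
    rw [hF, hAc]
    refine ⟨?_, rfl, hp0⟩
    simp only [List.getLast_singleton]
    rw [List.append_assoc, ← List.replicate_add]
    congr 2
    omega
  | cons nxt rest ih =>
    intro cur pos out d hp0 hpc h0 hL hmem hpw hch
    obtain ⟨hcn, hnL⟩ := hmem nxt (List.mem_cons_self ..)
    have hrest_gt : ∀ a ∈ rest, nxt < a := (List.pairwise_cons.mp hpw).1
    have hrest : ∀ a ∈ rest, nxt < a ∧ a < (cs.length : Int) :=
      fun a ha => ⟨hrest_gt a ha, (hmem a (List.mem_cons_of_mem _ ha)).2⟩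
    have hpw' := (List.pairwise_cons.mp hpw).2
    have hch' : ∀ p : Int, nxt < p → p < (cs.length : Int) →
        ((PySem.List.pyGetD cs p ' ' = PySem.Chars.upperChar (PySem.List.pyGetD cs p ' ') ∧ PySem.List.pyGetD cs p ' ' ≠ '.') ↔ p ∈ rest) := by
      intro p h1 h2
      constructor
      · intro h
        rcases List.mem_cons.mp ((hch p (by omega) h2).mp h) with h3 | h3
        · omega
        · exact h3
      · intro h
        exact (hch p (by omega) h2).mpr (List.mem_cons_of_mem _ h)
    have hsplit : pvSeg cs (cur + 1) (cs.length : Int)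
        = pvSeg cs (cur + 1) nxt
            ++ ((nxt, PySem.List.pyGetD cs nxt ' ') :: pvSeg cs (nxt + 1) (cs.length : Int)) := by
      unfold pvSeg
      rw [PySem.List.pyRange_one_append (cur + 1) nxt (cs.length : Int) (by omega) (by omega),
          PySem.List.pyRange_one_cons (a := nxt) (b := (cs.length : Int)) (by omega),
          List.map_append, List.map_cons]
    have hno1 : ∀ pc ∈ pvSeg cs (cur + 1) nxt,
        ¬(pc.2 = PySem.Chars.upperChar pc.2 ∧ pc.2 ≠ '.') := by
      intro pc hpc'
      obtain ⟨p, hp, rfl⟩ := List.mem_map.mp hpc'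
      have hb := PySem.List.mem_pyRange_one.mp hp
      intro h
      rcases List.mem_cons.mp ((hch p (by omega) (by omega)).mp h) with h3 | h3
      · omega
      · have := hrest_gt _ h3; omega
    have hanch : PySem.List.pyGetD cs nxt ' ' = PySem.Chars.upperChar (PySem.List.pyGetD cs nxt ' ') ∧ PySem.List.pyGetD cs nxt ' ' ≠ '.' :=
      (hch nxt (by omega) (by omega)).mpr (List.mem_cons_self ..)
    have hstored : pvStored (pvSeg cs (cur + 1) nxt)
        = pvA_unmeth (PySem.List.slice cs (some (cur + 1)) (some nxt)) cur :=
      pv_stored_eq cs cur nxt (by omega) (by omega) (by omega)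
    have hst1 : (pvSeg cs (cur + 1) nxt).foldl pvB_step ⟨some cur, none, none, out, pos, d⟩
        = ⟨some cur, (pvA_unmeth (PySem.List.slice cs (some (cur + 1)) (some nxt)) cur).head?,
           (pvA_unmeth (PySem.List.slice cs (some (cur + 1)) (some nxt)) cur).getLast?, out, pos, d⟩ := by
      rw [pv_noanch _ _ (by simp) hno1, hstored]
      simp [Option.or_none, Option.none_or]
    have hsl : (PySem.List.slice cs (some (cur + 1)) (some nxt)).length
        = nxt.toNat - (cur + 1).toNat := by
      rw [PySem.List.slice_of_nonneg cs (by omega) (by omega) (by omega) (by omega)]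
      simp
      omega
    have hFsplit : pvStF cs cur pos out d
        = (pvSeg cs (nxt + 1) (cs.length : Int)).foldl pvB_step
            (pvB_step ((pvSeg cs (cur + 1) nxt).foldl pvB_step ⟨some cur, none, none, out, pos, d⟩)
              (nxt, PySem.List.pyGetD cs nxt ' ')) := by
      unfold pvStF
      rw [hsplit, List.foldl_append, List.foldl_cons]
    have hAcsplit : pvAcF cs (nxt :: rest) cur pos out d
        = ((nxt :: rest).zip rest).foldl (pvStepAc cs)
            (pvStepAc cs (out.flatten ++ List.replicate (cur.toNat - pos.toNat) '.', d) (cur, nxt)) := by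
      unfold pvAcF
      rw [List.zip_cons_cons, List.foldl_cons]
    cases hcase : pvA_unmeth (PySem.List.slice cs (some (cur + 1)) (some nxt)) cur with
    | nil =>
      have hstep : pvB_step ⟨some cur,
          (pvA_unmeth (PySem.List.slice cs (some (cur + 1)) (some nxt)) cur).head?,
          (pvA_unmeth (PySem.List.slice cs (some (cur + 1)) (some nxt)) cur).getLast?, out, pos, d⟩
            (nxt, PySem.List.pyGetD cs nxt ' ')
          = ⟨some nxt, none, none, out, pos, d⟩ := by
        rw [hcase]
        exact pvB_step_anch1 _ _ _ _ _ _ hanch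
      have hac : pvStepAc cs (out.flatten ++ List.replicate (cur.toNat - pos.toNat) '.', d) (cur, nxt)
          = (out.flatten ++ List.replicate (nxt.toNat - pos.toNat) '.', d) := by
        rw [pvStepAc_nil cs _ cur nxt hcase]
        simp only [PySem.List.pyRepeat_singleton]
        rw [pv_chunks0 _ _ _ _ (by omega : cur.toNat - pos.toNat + (nxt - cur).toNat = nxt.toNat - pos.toNat)]
      obtain ⟨ih1, ih2, ih3⟩ := ih nxt pos out d hp0 (by omega) (by omega) hnL hrest hpw' hch'
      have hstF : pvStF cs cur pos out d = pvStF cs nxt pos out d := by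
        rw [hFsplit, hst1, hstep]
        rfl
      have hAcF : pvAcF cs (nxt :: rest) cur pos out d = pvAcF cs rest nxt pos out d := by
        rw [hAcsplit, hac]
        rfl
      refine ⟨?_, ?_, ?_⟩
      · rw [hstF, hAcF, ih1]
        rfl
      · rw [hstF, hAcF]; exact ih2
      · rw [hstF]; exact ih3
    | cons x xs =>
      have hne : pvA_unmeth (PySem.List.slice cs (some (cur + 1)) (some nxt)) cur ≠ [] := by
        rw [hcase]; exact List.cons_ne_nil _ _
      have hget0 : PySem.List.pyGetD (pvA_unmeth (PySem.List.slice cs (some (cur + 1)) (some nxt)) cur) 0 0 = x := by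
        rw [hcase, PySem.List.pyGetD_zero, List.getD_cons_zero]
      have hgetl : PySem.List.pyGetD (pvA_unmeth (PySem.List.slice cs (some (cur + 1)) (some nxt)) cur) (-1) 0
          = (x :: xs).getLast (List.cons_ne_nil _ _) := by
        rw [hcase, PySem.List.pyGetD_neg_one _ 0 (List.cons_ne_nil _ _)]
      have hub : ∀ u ∈ pvA_unmeth (PySem.List.slice cs (some (cur + 1)) (some nxt)) cur,
          cur ≤ u ∧ u ≤ nxt - 2 := by
        intro u hu
        have h := pv_unmeth_mem _ _ u hu
        rw [hsl] at h
        omega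
      have hu0 := hub x (by rw [hcase]; exact List.mem_cons_self ..)
      have hul := hub ((x :: xs).getLast (List.cons_ne_nil _ _))
        (by rw [hcase]; exact List.getLast_mem _)
      have hle : x ≤ (x :: xs).getLast (List.cons_ne_nil _ _) := by
        have := pv_head_le_getLast (pvA_unmeth (PySem.List.slice cs (some (cur + 1)) (some nxt)) cur)
          hne (pv_unmeth_sorted _ _)
        rwa [hget0, hgetl] at this
      have hlb : PySem.Int.floordiv (x + cur) 2 = (x + cur) / 2 :=
        PySem.Int.floordiv_eq_ediv_of_pos (by norm_num)
      have hrb : PySem.Int.floordiv ((x :: xs).getLast (List.cons_ne_nil _ _) + nxt) 2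
          = ((x :: xs).getLast (List.cons_ne_nil _ _) + nxt) / 2 :=
        PySem.Int.floordiv_eq_ediv_of_pos (by norm_num)
      have hb1 : cur ≤ (x + cur) / 2 := by omega
      have hb2 : (x + cur) / 2 ≤ ((x :: xs).getLast (List.cons_ne_nil _ _) + nxt) / 2 := by omega
      have hb3 : ((x :: xs).getLast (List.cons_ne_nil _ _) + nxt) / 2 ≤ nxt - 1 := by omega
      have hstep : pvB_step ⟨some cur,
          (pvA_unmeth (PySem.List.slice cs (some (cur + 1)) (some nxt)) cur).head?,
          (pvA_unmeth (PySem.List.slice cs (some (cur + 1)) (some nxt)) cur).getLast?, out, pos, d⟩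
            (nxt, PySem.List.pyGetD cs nxt ' ')
          = ⟨some nxt, none, none,
             out ++ [PySem.List.pyRepeat ['.'] (PySem.Int.floordiv (x + cur) 2 - pos),
                     PySem.List.pyRepeat ['F'] (PySem.Int.floordiv ((x :: xs).getLast (List.cons_ne_nil _ _) + nxt) 2 - PySem.Int.floordiv (x + cur) 2 + 1)],
             PySem.Int.floordiv ((x :: xs).getLast (List.cons_ne_nil _ _) + nxt) 2 + 1,
             d.insert (PySem.Chars.join ['-'] [PySem.Int.toChars (PySem.Int.floordiv (x + cur) 2),
                                               PySem.Int.toChars (PySem.Int.floordiv ((x :: xs).getLast (List.cons_ne_nil _ _) + nxt) 2)])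
                      (PySem.Int.floordiv ((x :: xs).getLast (List.cons_ne_nil _ _) + nxt) 2 - PySem.Int.floordiv (x + cur) 2 + 1)⟩ := by
        rw [hcase]
        rw [show (x :: xs).head? = some x from rfl,
            List.getLast?_eq_some_getLast (List.cons_ne_nil x xs)]
        exact pvB_step_anch2 _ _ _ _ _ _ _ _ hanch
      have hac : pvStepAc cs (out.flatten ++ List.replicate (cur.toNat - pos.toNat) '.', d) (cur, nxt)
          = ((out ++ [PySem.List.pyRepeat ['.'] (PySem.Int.floordiv (x + cur) 2 - pos),
                      PySem.List.pyRepeat ['F'] (PySem.Int.floordiv ((x :: xs).getLast (List.cons_ne_nil _ _) + nxt) 2 - PySem.Int.floordiv (x + cur) 2 + 1)]).flatten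
               ++ List.replicate (nxt.toNat - (PySem.Int.floordiv ((x :: xs).getLast (List.cons_ne_nil _ _) + nxt) 2 + 1).toNat) '.',
             d.insert (PySem.Chars.join ['-'] [PySem.Int.toChars (PySem.Int.floordiv (x + cur) 2),
                                               PySem.Int.toChars (PySem.Int.floordiv ((x :: xs).getLast (List.cons_ne_nil _ _) + nxt) 2)])
                      (PySem.Int.floordiv ((x :: xs).getLast (List.cons_ne_nil _ _) + nxt) 2 - PySem.Int.floordiv (x + cur) 2 + 1)) := by
        rw [pvStepAc_fp cs _ cur nxt hne, hget0, hgetl]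
        refine Prod.ext ?_ rfl
        simp only [List.flatten_append, List.flatten_cons, List.flatten_nil, List.append_nil,
          PySem.List.pyRepeat_singleton, hlb, hrb]
        exact pv_chunks _ _ _ _ _ _ _ (by omega) (by omega)
      obtain ⟨ih1, ih2, ih3⟩ := ih nxt (PySem.Int.floordiv ((x :: xs).getLast (List.cons_ne_nil _ _) + nxt) 2 + 1)
        (out ++ [PySem.List.pyRepeat ['.'] (PySem.Int.floordiv (x + cur) 2 - pos),
                 PySem.List.pyRepeat ['F'] (PySem.Int.floordiv ((x :: xs).getLast (List.cons_ne_nil _ _) + nxt) 2 - PySem.Int.floordiv (x + cur) 2 + 1)])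
        (d.insert (PySem.Chars.join ['-'] [PySem.Int.toChars (PySem.Int.floordiv (x + cur) 2),
                                           PySem.Int.toChars (PySem.Int.floordiv ((x :: xs).getLast (List.cons_ne_nil _ _) + nxt) 2)])
                  (PySem.Int.floordiv ((x :: xs).getLast (List.cons_ne_nil _ _) + nxt) 2 - PySem.Int.floordiv (x + cur) 2 + 1))
        (by rw [hrb]; omega) (by rw [hrb]; omega) (by omega) hnL hrest hpw' hch'
      have hstF : pvStF cs cur pos out d = pvStF cs nxt (PySem.Int.floordiv ((x :: xs).getLast (List.cons_ne_nil _ _) + nxt) 2 + 1) (out ++ [PySem.List.pyRepeat ['.'] (PySem.Int.floordiv (x + cur) 2 - pos),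
                 PySem.List.pyRepeat ['F'] (PySem.Int.floordiv ((x :: xs).getLast (List.cons_ne_nil _ _) + nxt) 2 - PySem.Int.floordiv (x + cur) 2 + 1)]) (d.insert (PySem.Chars.join ['-'] [PySem.Int.toChars (PySem.Int.floordiv (x + cur) 2),
                                           PySem.Int.toChars (PySem.Int.floordiv ((x :: xs).getLast (List.cons_ne_nil _ _) + nxt) 2)])
                  (PySem.Int.floordiv ((x :: xs).getLast (List.cons_ne_nil _ _) + nxt) 2 - PySem.Int.floordiv (x + cur) 2 + 1)) := by
        rw [hFsplit, hst1, hstep]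
        rfl
      have hAcF : pvAcF cs (nxt :: rest) cur pos out d = pvAcF cs rest nxt (PySem.Int.floordiv ((x :: xs).getLast (List.cons_ne_nil _ _) + nxt) 2 + 1) (out ++ [PySem.List.pyRepeat ['.'] (PySem.Int.floordiv (x + cur) 2 - pos),
                 PySem.List.pyRepeat ['F'] (PySem.Int.floordiv ((x :: xs).getLast (List.cons_ne_nil _ _) + nxt) 2 - PySem.Int.floordiv (x + cur) 2 + 1)]) (d.insert (PySem.Chars.join ['-'] [PySem.Int.toChars (PySem.Int.floordiv (x + cur) 2),
                                           PySem.Int.toChars (PySem.Int.floordiv ((x :: xs).getLast (List.cons_ne_nil _ _) + nxt) 2)])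
                  (PySem.Int.floordiv ((x :: xs).getLast (List.cons_ne_nil _ _) + nxt) 2 - PySem.Int.floordiv (x + cur) 2 + 1)) := by
        rw [hAcsplit, hac]
        rfl
      refine ⟨?_, ?_, ?_⟩
      · rw [hstF, hAcF, ih1]
        rfl
      · rw [hstF, hAcF]; exact ih2
      · rw [hstF]; exact ih3

-- ===== main equivalence =====
theorem pv_main (s : String) : call_footprints s = call_footprints_alt s := by
  have henum : PySem.List.enumerate s.toList 0 = pvSeg s.toList 0 ((s.toList).length : Int) := by
    rw [PySem.List.enumerate_eq_map_pyRange s.toList ' ']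
    unfold pvSeg
    rw [PySem.List.len_eq]
  have hiff := pv_anchors_mem_iff s.toList
  have hsort := pv_anchors_sorted s.toList
  rcases hA : pvA_upperLocs s.toList with _ | ⟨a0, tl⟩
  · -- no anchor at all: A takes its else-branch, B's stream never changes state
    have hno : ∀ pc ∈ pvSeg s.toList 0 ((s.toList).length : Int),
        ¬(pc.2 = PySem.Chars.upperChar pc.2 ∧ pc.2 ≠ '.') := by
      intro pc hpc'
      obtain ⟨p, hp, rfl⟩ := List.mem_map.mp hpc'
      have hb := PySem.List.mem_pyRange_one.mp hp
      intro h
      have : p ∈ pvA_upperLocs s.toList := (hiff p).mpr ⟨hb.1, hb.2, h⟩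
      rw [hA] at this
      exact List.not_mem_nil this
    have hB : (PySem.List.enumerate s.toList 0).foldl pvB_step
        ⟨none, none, none, [], 0, PySem.Dict.empty⟩ = ⟨none, none, none, [], 0, PySem.Dict.empty⟩ := by
      rw [henum]
      exact pv_noanch0 _ _ rfl hno
    simp only [call_footprints, call_footprints_alt]
    rw [hA, hB]
    norm_num
  · obtain ⟨h0a, h0b, h0anch⟩ := (hiff a0).mp (hA ▸ List.mem_cons_self ..)
    have hbnd : ∀ a ∈ a0 :: tl, 0 ≤ a ∧ a < ((s.toList).length : Int) :=
      fun a ha => ⟨((hiff a).mp (hA ▸ ha)).1, ((hiff a).mp (hA ▸ ha)).2.1⟩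
    have hpwA : List.Pairwise (· < ·) (a0 :: tl) := hA ▸ hsort
    have hno0 : ∀ pc ∈ pvSeg s.toList 0 a0,
        ¬(pc.2 = PySem.Chars.upperChar pc.2 ∧ pc.2 ≠ '.') := by
      intro pc hpc'
      obtain ⟨p, hp, rfl⟩ := List.mem_map.mp hpc'
      have hb := PySem.List.mem_pyRange_one.mp hp
      intro h
      have hmem : p ∈ a0 :: tl := hA ▸ (hiff p).mpr ⟨hb.1, by omega, h⟩
      rcases List.mem_cons.mp hmem with h3 | h3
      · omega
      · have := (List.pairwise_cons.mp hpwA).1 _ h3; omega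
    have hBpre : (PySem.List.enumerate s.toList 0).foldl pvB_step
        ⟨none, none, none, [], 0, PySem.Dict.empty⟩ = pvStF s.toList a0 0 [] PySem.Dict.empty := by
      rw [henum,
          show pvSeg s.toList 0 ((s.toList).length : Int)
            = pvSeg s.toList 0 a0
                ++ ((a0, PySem.List.pyGetD s.toList a0 ' ') :: pvSeg s.toList (a0 + 1) ((s.toList).length : Int)) from by
            unfold pvSeg
            rw [PySem.List.pyRange_one_append 0 a0 ((s.toList).length : Int) (by omega) (by omega),
                PySem.List.pyRange_one_cons (a := a0) (b := ((s.toList).length : Int)) (by omega),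
                List.map_append, List.map_cons],
          List.foldl_append, pv_noanch0 _ _ rfl hno0, List.foldl_cons,
          pvB_step_anch1 _ _ _ _ _ _ h0anch]
      rfl
    have hmemtl : ∀ a ∈ tl, a0 < a ∧ a < ((s.toList).length : Int) :=
      fun a ha => ⟨(List.pairwise_cons.mp hpwA).1 a ha, (hbnd a (List.mem_cons_of_mem _ ha)).2⟩
    have hchtl : ∀ p : Int, a0 < p → p < ((s.toList).length : Int) →
        ((PySem.List.pyGetD s.toList p ' ' = PySem.Chars.upperChar (PySem.List.pyGetD s.toList p ' ')
            ∧ PySem.List.pyGetD s.toList p ' ' ≠ '.') ↔ p ∈ tl) := by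
      intro p h1 h2
      constructor
      · intro h
        rcases List.mem_cons.mp (hA ▸ (hiff p).mpr ⟨by omega, h2, h⟩) with h3 | h3
        · omega
        · exact h3
      · intro h
        exact ((hiff p).mp (hA ▸ List.mem_cons_of_mem _ h)).2.2
    obtain ⟨hs1, hs2, hs3⟩ := pv_streamloop s.toList tl a0 0 [] PySem.Dict.empty
      le_rfl h0a h0a h0b hmemtl (List.pairwise_cons.mp hpwA).2 hchtl
    have hBval : call_footprints_alt s
        = (String.ofList ((pvAcF s.toList tl a0 0 [] PySem.Dict.empty).1
              ++ List.replicate ((s.toList).length - (((a0 :: tl).getLast (List.cons_ne_nil _ _)).toNat)) '.'),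
           (pvAcF s.toList tl a0 0 [] PySem.Dict.empty).2.items.map (fun p => (String.ofList p.1, p.2))) := by
      simp only [call_footprints_alt]
      rw [hBpre, pv_join_nil_flatten, List.flatten_append]
      simp only [List.flatten_cons, List.flatten_nil, List.append_nil, PySem.List.pyRepeat_singleton]
      rw [show (((s.toList).length : Int) - (pvStF s.toList a0 0 [] PySem.Dict.empty).pos).toNat
            = (s.toList).length - (pvStF s.toList a0 0 [] PySem.Dict.empty).pos.toNat from by omega,
          hs1, hs2]
    cases htl : tl with
    | nil =>
      -- exactly one anchor: A takes its else-branch; B closed no interval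
      have hlast : (a0 :: tl).getLast (List.cons_ne_nil _ _) = a0 := by rw [htl]; rfl
      have hAcv : pvAcF s.toList tl a0 0 [] PySem.Dict.empty
          = (List.replicate a0.toNat '.', PySem.Dict.empty) := by
        rw [htl]
        unfold pvAcF
        simp
      rw [hBval, hAcv, hlast]
      simp only [call_footprints]
      rw [hA, htl]
      norm_num
      have hb' : a0 < (s.length : Int) := by simpa using h0b
      rw [show a0.toNat + (s.length - a0.toNat) = s.length from by omega]
    | cons a1 rest2 =>
      subst htl
      -- at least two anchors: A takes its main branch
      have hlpos : 0 ≤ (a0 :: a1 :: rest2).getLast (List.cons_ne_nil _ _)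
          ∧ (a0 :: a1 :: rest2).getLast (List.cons_ne_nil _ _) < ((s.toList).length : Int) :=
        hbnd _ (List.getLast_mem _)
      have hfv0 : ((PySem.List.pyRepeat ['.'] (PySem.List.pyGetD (a0 :: a1 :: rest2) 0 0)).map
          (fun c => [c])).flatten = List.replicate a0.toNat '.' := by
        rw [PySem.List.pyGetD_zero, List.getD_cons_zero, PySem.List.pyRepeat_singleton]
        simp
      have hflat := pv_foldA_flatten s.toList ((a0 :: a1 :: rest2).zip (a1 :: rest2))
        ((PySem.List.pyRepeat ['.'] (PySem.List.pyGetD (a0 :: a1 :: rest2) 0 0)).map (fun c => [c]))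
        PySem.Dict.empty
      rw [hfv0] at hflat
      have hf1 := congrArg Prod.fst hflat
      have hf2 := congrArg Prod.snd hflat
      simp only at hf1 hf2
      have hAcv : pvAcF s.toList (a1 :: rest2) a0 0 [] PySem.Dict.empty
          = ((a0 :: a1 :: rest2).zip (a1 :: rest2)).foldl (pvStepAc s.toList)
              (List.replicate a0.toNat '.', PySem.Dict.empty) := by
        rfl
      rw [hBval, hAcv]
      simp only [call_footprints]
      rw [hA]
      rw [if_pos (by simp)]
      rw [pv_foldA_indexed]
      simp only [List.tail_cons]
      refine Prod.ext ?_ ?_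
      · show String.ofList (PySem.Chars.join [] _) = _
        rw [pv_join_nil_flatten, List.flatten_append, hf1]
        simp only [List.flatten_cons, List.flatten_nil, List.append_nil]
        congr 2
        rw [PySem.List.pyGetD_neg_one _ 0 (List.cons_ne_nil _ _), PySem.List.pyRepeat_singleton]
        congr 1
        omega
      · show (_ : PySem.Dict (List Char) Int).items.map _ = _
        rw [hf2]

-- ===== VERDICT =====
theorem call_footprints_spec : Claim_equal_call_footprints := by
  intro s _
  unfold Spec_call_footprints
  exact pv_main s
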